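-- pv_equiv track=rewrite | github.com/K-Y-k/Coding_Test_Python_SQL | 프로그래머스/Lv1/문자열 나누기-카운트 2개로 나누기.py | solution
-- ===== SOURCE A (Python) =====
-- def solution(s):
--     answer = 0
--     s_dic = {}
--     tmp = ''
--
--     for i in s:
--         tmp += i
--
--         if i not in s_dic:
--             s_dic[i] = 1
--         else:
--             s_dic[i] += 1
--
--         if len(s_dic) > 1:
--             for j in s_dic:
--                 if i != j and s_dic[i] == s_dic[j]:
--                     s=s.replace(tmp, '', 1)
--                     tmp = ''
--                     s_dic = {}
--                     answer += 1
--                     break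
--
--     if len(s) > 0:
--         answer += 1
--
--     return answer
-- ===== SOURCE B (Python) =====
-- def solution(s):
--     answer = 0
--     counts = {}
--     seg_len = 0
--     i = 0
--     n = len(s)
--     while i < n:
--         ch = s[i]
--         j = i + 1
--         while j < n and s[j] == ch:
--             j += 1
--         m = j - i
--         prev = counts.get(ch, 0)
--         cand = [v for k, v in counts.items() if k != ch and prev < v <= prev + m]
--         if cand:
--             answer += 1
--             left = prev + m - min(cand)
--             counts = {ch: left} if left else {}
--             seg_len = left
--         else:
--             counts[ch] = prev + m
--             seg_len += m
--         i = j
--     return answer + (1 if seg_len > 0 else 0)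
-- ===== Notes on version B (the rewrite author's own statement) =====
-- stated objective: faster
-- what changed: B walks the string one maximal run of equal characters at a time, deciding each run's split point from a single scan of the character counter, instead of A's per-character dict scan plus an O(len(s)) s.replace and string rebuild at every split.
import Mathlib
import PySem

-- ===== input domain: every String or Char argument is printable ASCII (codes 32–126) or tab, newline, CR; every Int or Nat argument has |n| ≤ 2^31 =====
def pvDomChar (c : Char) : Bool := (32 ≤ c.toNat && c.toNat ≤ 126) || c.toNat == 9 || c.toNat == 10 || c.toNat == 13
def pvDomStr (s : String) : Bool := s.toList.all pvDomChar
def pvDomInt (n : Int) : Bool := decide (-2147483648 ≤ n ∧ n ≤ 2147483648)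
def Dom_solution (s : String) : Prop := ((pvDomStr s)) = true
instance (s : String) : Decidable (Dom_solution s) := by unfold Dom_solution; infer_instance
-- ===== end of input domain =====

-- B processes the string run of equal characters by run (one candidate scan per run instead of
-- per character) and never rebuilds the string, replacing A's per-split s.replace scan (objective: faster).

-- ===== PORT A =====
-- hand port of Python's s.replace(old, '', 1): remove the first occurrence of old
-- (exact: PySem.Chars.find is Python's s.find(old); count=1 removes only that occurrence,
--  and for old = '' Python's s.replace('', '', 1) = '' + s = s, which this also returns since find s [] = 0)
def pvReplaceOnce (s old : List Char) : List Char :=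
  let i := PySem.Chars.find s old
  if i = -1 then s else s.take i.toNat ++ s.drop (i.toNat + old.length)

-- one iteration of A's `for i in s` loop; state = (answer, s, s_dic, tmp)
def solutionStepA (st : Int × List Char × PySem.Dict Char Int × List Char) (c : Char) :
    Int × List Char × PySem.Dict Char Int × List Char :=
  let tmp := st.2.2.2 ++ [c]
  let dic := if st.2.2.1.contains c then st.2.2.1.modify c 0 (· + 1) else st.2.2.1.insert c 1
  if 1 < dic.size then
    if dic.keys.any (fun j => j != c && dic.getD c 0 == dic.getD j 0) then
      (st.1 + 1, pvReplaceOnce st.2.1 tmp, PySem.Dict.empty, [])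
    else (st.1, st.2.1, dic, tmp)
  else (st.1, st.2.1, dic, tmp)

def solution (s : String) : Int :=
  let st := s.toList.foldl solutionStepA (0, s.toList, PySem.Dict.empty, [])
  if 0 < st.2.1.length then st.1 + 1 else st.1

-- ===== PORT B =====
-- B's outer `while i < n` loop, one iteration per run of equal characters;
-- the inner `while j < n and s[j] == ch` scan is the takeWhile, `i = j` is the dropWhile;
-- Python's `if cand: ... min(cand)` is the match on PySem.List.min? (none exactly when cand is empty).
def solutionRunsB (l : List Char) (st : Int × PySem.Dict Char Int × Int) :
    Int × PySem.Dict Char Int × Int :=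
  match l with
  | [] => st
  | c :: ls =>
    let run := ls.takeWhile (fun x => x == c)
    let m : Int := (run.length : Int) + 1
    let prev := st.2.1.getD c 0
    let cand := (st.2.1.items.filter
        (fun p => p.1 != c && decide (prev < p.2 ∧ p.2 ≤ prev + m))).map (fun p => p.2)
    let st' :=
      match PySem.List.min? cand id with
      | some v =>
        let left := prev + m - v
        (st.1 + 1, if left ≠ 0 then PySem.Dict.empty.insert c left else PySem.Dict.empty, left)
      | none => (st.1, st.2.1.insert c (prev + m), st.2.2 + m)
    solutionRunsB (ls.dropWhile (fun x => x == c)) st'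
termination_by l.length
decreasing_by
  have := List.length_dropWhile_le (fun x => x == c) ls
  simp only [List.length_cons]
  omega

def solution_alt (s : String) : Int :=
  let st := solutionRunsB s.toList (0, PySem.Dict.empty, 0)
  st.1 + (if 0 < st.2.2 then 1 else 0)

-- ===== PRECONDITION & SPEC =====
def Spec_solution (s : String) (out : Int) : Prop := out = solution_alt s
instance (s : String) (out : Int) : Decidable (Spec_solution s out) := by unfold Spec_solution; infer_instance

-- ===== CLAIM (what is proved, stated in full; the proofs are below) =====
def Claim_equal_solution : Prop := ∀ (s : String), Dom_solution s → Spec_solution s (solution s)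

-- ===== LEMMAS AND PROOFS =====

-- the split condition of A's (abstracted) step (proof-only helper)
def pvCond (tmp : List Char) (c : Char) : Bool :=
  (PySem.Dict.counter (tmp ++ [c])).items.any
    (fun p => p.1 != c && p.2 == (PySem.Dict.counter tmp).getD c 0 + 1)

-- the candidate list B computes for a run, expressed over the segment tmp (proof-only helper)
def pvCand (tmp : List Char) (c : Char) (m : Int) : List Int :=
  ((PySem.Dict.counter tmp).items.filter
    (fun p => p.1 != c && decide ((tmp.count c : Int) < p.2 ∧ p.2 ≤ (tmp.count c : Int) + m))).map
    (fun p => p.2)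

-- a list containing two distinct elements has length > 1
lemma pvTwoMemLength {α : Type} {l : List α} {a b : α} (ha : a ∈ l) (hb : b ∈ l)
    (h : a ≠ b) : 1 < l.length := by
  obtain ⟨s, t, rfl⟩ := List.append_of_mem ha
  simp only [List.mem_append, List.mem_cons] at hb
  rcases hb with hb | hb | hb
  · have := List.length_pos_of_mem hb
    simp [List.length_append]; omega
  · exact absurd hb.symm h
  · have := List.length_pos_of_mem hb
    simp [List.length_append]; omega

-- removing the first occurrence of a prefix leaves exactly the rest
lemma pvReplaceOnce_prefix (pre rest : List Char) :
    pvReplaceOnce (pre ++ rest) pre = rest := by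
  have hfind : PySem.Chars.find (pre ++ rest) pre = 0 := by
    have hnn : 0 ≤ PySem.Chars.find (pre ++ rest) pre := by
      rw [PySem.Chars.find_nonneg_iff]
      exact (List.prefix_append pre rest).isInfix
    have hspec := PySem.Chars.find_spec hnn
    by_contra hne
    have hpos : 0 < (PySem.Chars.find (pre ++ rest) pre).toNat := by omega
    exact hspec.2 0 hpos (List.prefix_append pre rest)
  simp [pvReplaceOnce, hfind]

-- A's dict update is the counter step
lemma pvDicStep (tmp : List Char) (c : Char) :
    (if (PySem.Dict.counter tmp).contains c then (PySem.Dict.counter tmp).modify c 0 (· + 1)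
     else (PySem.Dict.counter tmp).insert c 1) = PySem.Dict.counter (tmp ++ [c]) := by
  rw [PySem.Dict.counter_append_singleton]
  split_ifs with h
  · rfl
  · have h' : (PySem.Dict.counter tmp).contains c = false := by simpa using h
    show (PySem.Dict.counter tmp).insert c 1
        = (PySem.Dict.counter tmp).insert c ((PySem.Dict.counter tmp).getD c 0 + 1)
    rw [PySem.Dict.getD_of_not_contains _ _ h']
    norm_num

-- the split test A performs agrees with pvCond on the counter of the current segment
lemma pvCondEq (tmp : List Char) (c : Char) :
    (if 1 < (PySem.Dict.counter (tmp ++ [c])).size then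
      (PySem.Dict.counter (tmp ++ [c])).keys.any
        (fun j => j != c && (PySem.Dict.counter (tmp ++ [c])).getD c 0 == (PySem.Dict.counter (tmp ++ [c])).getD j 0)
     else false)
    = pvCond tmp c := by
  have hN : (PySem.Dict.counter tmp).getD c 0 + 1 = (((tmp ++ [c]).count c : Nat) : Int) := by
    rw [PySem.Dict.getD_counter]
    push_cast [List.count_append]
    simp
  have hsize : (PySem.Dict.counter (tmp ++ [c])).size = (PySem.Set.ofList (tmp ++ [c])).length := by
    show (PySem.Dict.counter (tmp ++ [c])).items.length = _
    rw [PySem.Dict.items_counter, List.length_map]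
  have hany : (PySem.Dict.counter (tmp ++ [c])).keys.any
        (fun j => j != c && (PySem.Dict.counter (tmp ++ [c])).getD c 0 == (PySem.Dict.counter (tmp ++ [c])).getD j 0)
      = pvCond tmp c := by
    unfold pvCond
    rw [PySem.Dict.items_counter, List.any_map, PySem.Dict.keys_counter, hN]
    apply congrArg
    funext j
    simp only [Function.comp, PySem.Dict.getD_counter]
    rw [Bool.beq_comm]
  by_cases hs : 1 < (PySem.Dict.counter (tmp ++ [c])).size
  · rw [if_pos hs, hany]
  · rw [if_neg hs]
    cases hpv : pvCond tmp c with
    | false => rfl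
    | true =>
      exfalso
      unfold pvCond at hpv
      rw [PySem.Dict.items_counter, List.any_map, List.any_eq_true] at hpv
      obtain ⟨j, hj, hprop⟩ := hpv
      simp only [Function.comp, Bool.and_eq_true, bne_iff_ne, ne_eq] at hprop
      have hc : c ∈ PySem.Set.ofList (tmp ++ [c]) := by
        rw [PySem.Set.mem_ofList]; simp
      exact hs (by rw [hsize]; exact pvTwoMemLength hc hj (Ne.symm hprop.1))

-- one step of A's loop from an invariant state
lemma pvStepA_eq (ans : Int) (rest tmp : List Char) (c : Char) :
    solutionStepA (ans, tmp ++ (c :: rest), PySem.Dict.counter tmp, tmp) c =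
      if pvCond tmp c then (ans + 1, rest, PySem.Dict.counter [], [])
      else (ans, (tmp ++ [c]) ++ rest, PySem.Dict.counter (tmp ++ [c]), tmp ++ [c]) := by
  show (let tmp' := tmp ++ [c];
        let dic := if (PySem.Dict.counter tmp).contains c then (PySem.Dict.counter tmp).modify c 0 (· + 1)
                   else (PySem.Dict.counter tmp).insert c 1;
        if 1 < dic.size then
          if dic.keys.any (fun j => j != c && dic.getD c 0 == dic.getD j 0) then
            (ans + 1, pvReplaceOnce (tmp ++ (c :: rest)) tmp', PySem.Dict.empty, ([] : List Char))
          else (ans, tmp ++ (c :: rest), dic, tmp')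
        else (ans, tmp ++ (c :: rest), dic, tmp')) = _
  simp only [pvDicStep]
  rw [← pvCondEq tmp c]
  split_ifs with h1 h2 h2
  · rw [List.append_cons tmp c rest, pvReplaceOnce_prefix]
    rfl
  · rw [List.append_cons tmp c rest]
  · simp at h2
  · rw [List.append_cons tmp c rest]

-- pvCond characterized by counts over the segment
lemma pvCond_iff (tmp : List Char) (c : Char) :
    pvCond tmp c = true ↔ ∃ k, k ∈ tmp ∧ k ≠ c ∧ (tmp.count k : Int) = (tmp.count c : Int) + 1 := by
  unfold pvCond
  rw [PySem.Dict.items_counter, List.any_map, List.any_eq_true]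
  simp only [Function.comp, Bool.and_eq_true, bne_iff_ne, ne_eq, beq_iff_eq,
    PySem.Dict.getD_counter, PySem.Set.mem_ofList, List.mem_append, List.mem_singleton,
    List.count_append, List.count_singleton]
  constructor
  · rintro ⟨k, hk, hne, hcnt⟩
    rw [if_neg (fun hcontra => hne hcontra.symm)] at hcnt
    refine ⟨k, ?_, hne, by omega⟩
    rcases hk with hk | hk
    · exact hk
    · exact absurd hk hne
  · rintro ⟨k, hk, hne, hcnt⟩
    exact ⟨k, Or.inl hk, hne, by rw [if_neg (fun hcontra => hne hcontra.symm)]; omega⟩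

-- pvCand membership characterized by counts over the segment
lemma pvCand_mem (tmp : List Char) (c : Char) (m v : Int) :
    v ∈ pvCand tmp c m ↔ ∃ k, k ∈ tmp ∧ k ≠ c ∧ (tmp.count k : Int) = v ∧
      (tmp.count c : Int) < v ∧ v ≤ (tmp.count c : Int) + m := by
  unfold pvCand
  rw [PySem.Dict.items_counter]
  simp only [List.mem_map, List.mem_filter, Bool.and_eq_true, bne_iff_ne, ne_eq,
    decide_eq_true_eq, PySem.Set.mem_ofList]
  constructor
  · rintro ⟨a, ⟨⟨⟨k, hk, rfl⟩, hne, hlo, hhi⟩, rfl⟩⟩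
    exact ⟨k, hk, hne, rfl, hlo, hhi⟩
  · rintro ⟨k, hk, hne, hv, hlo, hhi⟩
    exact ⟨(k, (tmp.count k : Int)), ⟨⟨k, hk, rfl⟩, hne, hv ▸ ⟨hlo, hhi⟩⟩, hv⟩

-- min? only depends on membership
lemma pvMinEq (l₁ l₂ : List Int) (h : ∀ v, v ∈ l₁ ↔ v ∈ l₂) :
    PySem.List.min? l₁ id = PySem.List.min? l₂ id := by
  cases h1 : PySem.List.min? l₁ id with
  | none =>
    rw [PySem.List.min?_eq_none_iff] at h1
    symm
    rw [PySem.List.min?_eq_none_iff]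
    rw [List.eq_nil_iff_forall_not_mem] at h1 ⊢
    intro v hv
    exact h1 v ((h v).mpr hv)
  | some v =>
    have hv2 : v ∈ l₂ := (h v).mp (PySem.List.min?_mem h1)
    cases h2 : PySem.List.min? l₂ id with
    | none =>
      rw [PySem.List.min?_eq_none_iff] at h2
      subst h2
      simp at hv2
    | some w =>
      have hw1 : w ∈ l₁ := (h w).mpr (PySem.List.min?_mem h2)
      have hvw : v ≤ w := PySem.List.min?_id_le h1 w hw1
      have hwv : w ≤ v := PySem.List.min?_id_le h2 v hv2
      rw [le_antisymm hvw hwv]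

-- min? of a list whose least element is known
lemma pvMinEqSome (l : List Int) (w : Int) (hw : w ∈ l) (hmin : ∀ x ∈ l, w ≤ x) :
    PySem.List.min? l id = some w := by
  cases h : PySem.List.min? l id with
  | none =>
    rw [PySem.List.min?_eq_none_iff] at h
    subst h
    simp at hw
  | some v =>
    have hv : v ∈ l := PySem.List.min?_mem h
    have h1 : v ≤ w := PySem.List.min?_id_le h w hw
    have h2 : w ≤ v := hmin v hv
    rw [le_antisymm h1 h2]

-- the candidate list over the empty segment is empty
lemma pvCand_nil (c : Char) (m : Int) : pvCand [] c m = [] := by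
  rfl

-- counters of pure runs
lemma pvCounterReplicate (c : Char) (t : Nat) :
    PySem.Dict.counter (List.replicate t c)
      = if t = 0 then PySem.Dict.empty else PySem.Dict.empty.insert c (t : Int) := by
  induction t with
  | zero => rfl
  | succ n ih =>
    rw [List.replicate_succ', PySem.Dict.counter_append_singleton, ih]
    by_cases hn : n = 0
    · subst hn
      show (PySem.Dict.empty.modify c 0 (· + 1)) = PySem.Dict.empty.insert c ((1 : Nat) : Int)
      show PySem.Dict.empty.insert c (PySem.Dict.empty.getD c 0 + 1) = _
      rw [PySem.Dict.getD_empty]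
      norm_num
    · rw [if_neg hn, if_neg (Nat.succ_ne_zero n)]
      show (PySem.Dict.empty.insert c (n : Int)).insert c
          ((PySem.Dict.empty.insert c (n : Int)).getD c 0 + 1) = _
      rw [PySem.Dict.getD_insert_self, PySem.Dict.insert_insert_self]
      congr 1
      try push_cast

lemma pvCounterAppendRun (tmp : List Char) (c : Char) (t : Nat) (ht : 1 ≤ t) :
    (PySem.Dict.counter tmp).insert c ((tmp.count c : Int) + t)
      = PySem.Dict.counter (tmp ++ List.replicate t c) := by
  induction t with
  | zero => exact absurd ht (by omega)
  | succ n ih =>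
    by_cases hn : n = 0
    · subst hn
      have h1 : List.replicate 1 c = [c] := rfl
      rw [h1, PySem.Dict.counter_append_singleton]
      show _ = (PySem.Dict.counter tmp).insert c ((PySem.Dict.counter tmp).getD c 0 + 1)
      rw [PySem.Dict.getD_counter]
      norm_num
    · have hn1 : 1 ≤ n := by omega
      rw [List.replicate_succ', ← List.append_assoc, PySem.Dict.counter_append_singleton,
        ← ih hn1]
      show _ = ((PySem.Dict.counter tmp).insert c ((tmp.count c : Int) + n)).insert c
          (((PySem.Dict.counter tmp).insert c ((tmp.count c : Int) + n)).getD c 0 + 1)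
      rw [PySem.Dict.getD_insert_self, PySem.Dict.insert_insert_self]
      congr 1
      try push_cast

-- folding A over one whole run of equal characters, in closed form
lemma pvChunk : ∀ (R : List Char) (c : Char), (∀ x ∈ R, x = c) →
    ∀ (rest tmp : List Char) (ans : Int),
    R.foldl solutionStepA (ans, tmp ++ (R ++ rest), PySem.Dict.counter tmp, tmp)
      = match PySem.List.min? (pvCand tmp c (R.length : Int)) id with
        | none => (ans, (tmp ++ R) ++ rest, PySem.Dict.counter (tmp ++ R), tmp ++ R)
        | some v => (ans + 1,
            List.replicate ((tmp.count c : Int) + R.length - v).toNat c ++ rest,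
            PySem.Dict.counter (List.replicate ((tmp.count c : Int) + R.length - v).toNat c),
            List.replicate ((tmp.count c : Int) + R.length - v).toNat c) := by
  intro R c
  induction R with
  | nil =>
    intro _ rest tmp ans
    have hnil : pvCand tmp c ((0 : Nat) : Int) = [] := by
      rw [List.eq_nil_iff_forall_not_mem]
      intro v hv
      obtain ⟨k, _, _, _, hlo, hhi⟩ := (pvCand_mem tmp c _ v).mp hv
      omega
    simp only [List.length_nil, List.foldl_nil, List.nil_append, hnil]
    rw [show PySem.List.min? ([] : List Int) id = none from
      (PySem.List.min?_eq_none_iff [] id).mpr rfl]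
    simp
  | cons c' R' ih =>
    intro hR rest tmp ans
    have hc' : c' = c := hR c' (by simp)
    rw [hc']
    have hR' : ∀ x ∈ R', x = c := fun x hx => hR x (by simp [hx])
    simp only [List.foldl_cons, List.cons_append]
    rw [pvStepA_eq]
    by_cases hcond : pvCond tmp c = true
    · rw [if_pos hcond]
      obtain ⟨k, hk, hkne, hkcnt⟩ := (pvCond_iff tmp c).mp hcond
      have hmem : ((tmp.count c : Int) + 1) ∈ pvCand tmp c (((c :: R').length : Nat) : Int) :=
        (pvCand_mem tmp c _ _).mpr ⟨k, hk, hkne, hkcnt, by omega, by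
          simp only [List.length_cons]; push_cast; omega⟩
      have hlb : ∀ x ∈ pvCand tmp c (((c :: R').length : Nat) : Int), (tmp.count c : Int) + 1 ≤ x := by
        intro x hx
        obtain ⟨k', _, _, _, hlo, _⟩ := (pvCand_mem tmp c _ x).mp hx
        omega
      rw [pvMinEqSome _ _ hmem hlb]
      have hml := ih hR' rest [] (ans + 1)
      rw [pvCand_nil] at hml
      simp only [List.nil_append] at hml
      have hmlnone : PySem.List.min? ([] : List Int) id = none := by
        rw [PySem.List.min?_eq_none_iff]
      rw [hmlnone] at hml
      have harith : (((tmp.count c : Int)) + ((c :: R').length : Nat) - ((tmp.count c : Int) + 1)).toNat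
          = R'.length := by
        simp only [List.length_cons]; push_cast; omega
      have hrep : List.replicate R'.length c = R' := (List.eq_replicate_of_mem hR').symm
      simp only [harith, hrep]
      exact hml
    · rw [if_neg hcond]
      have hml := ih hR' rest (tmp ++ [c]) ans
      rw [hml]
      have hcnt1 : (((tmp ++ [c]).count c : Nat) : Int) = (tmp.count c : Int) + 1 := by
        simp [List.count_append]
      have hmin : PySem.List.min? (pvCand (tmp ++ [c]) c ((R'.length : Nat) : Int)) id
          = PySem.List.min? (pvCand tmp c (((c :: R').length : Nat) : Int)) id := by
        apply pvMinEq
        intro v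
        rw [pvCand_mem, pvCand_mem]
        have hnot := fun k hk hkne hkcnt => hcond ((pvCond_iff tmp c).mpr ⟨k, hk, hkne, hkcnt⟩)
        constructor
        · rintro ⟨k, hk, hkne, hv, hlo, hhi⟩
          rw [List.count_append, List.count_singleton, if_neg (fun h => hkne (beq_iff_eq.mp h).symm)] at hv
          rw [hcnt1] at hlo hhi  -- careful: hlo/hhi use count over tmp++[c]
          refine ⟨k, ?_, hkne, by simpa using hv, by omega, by
            simp only [List.length_cons]; push_cast at hhi ⊢; omega⟩
          rcases List.mem_append.mp hk with h | h
          · exact h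
          · exact absurd (List.mem_singleton.mp h) hkne
        · rintro ⟨k, hk, hkne, hv, hlo, hhi⟩
          have hne1 : v ≠ (tmp.count c : Int) + 1 := by
            intro hveq
            exact hnot k hk hkne (by omega)
          refine ⟨k, List.mem_append.mpr (Or.inl hk), hkne, ?_, ?_, ?_⟩
          · rw [List.count_append, List.count_singleton, if_neg (fun h => hkne (beq_iff_eq.mp h).symm)]
            simpa using hv
          · rw [hcnt1]; omega
          · rw [hcnt1]; simp only [List.length_cons] at hhi; push_cast at hhi ⊢; omega
      rw [hmin]
      cases hE : PySem.List.min? (pvCand tmp c (((c :: R').length : Nat) : Int)) id with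
      | none =>
        simp only []
        rw [← List.append_cons]
      | some v =>
        simp only []
        have harith2 : (((tmp ++ [c]).count c : Nat) : Int) + (R'.length : Nat) - v
            = ((tmp.count c : Nat) : Int) + ((c :: R').length : Nat) - v := by
          rw [hcnt1]; simp only [List.length_cons]; push_cast; ring
        rw [harith2]

-- one outer-loop iteration of B, unfolded
lemma pvRunsB_cons (c : Char) (ls : List Char) (a seg : Int) (d : PySem.Dict Char Int) :
    solutionRunsB (c :: ls) (a, d, seg) =
      solutionRunsB (ls.dropWhile (fun x => x == c))
        (match PySem.List.min? ((d.items.filter (fun p => p.1 != c &&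
            decide (d.getD c 0 < p.2 ∧
              p.2 ≤ d.getD c 0 + (((ls.takeWhile (fun x => x == c)).length : Int) + 1)))).map
            (fun p => p.2)) id with
         | some v => (a + 1,
             if d.getD c 0 + (((ls.takeWhile (fun x => x == c)).length : Int) + 1) - v ≠ 0
             then PySem.Dict.empty.insert c
               (d.getD c 0 + (((ls.takeWhile (fun x => x == c)).length : Int) + 1) - v)
             else PySem.Dict.empty,
             d.getD c 0 + (((ls.takeWhile (fun x => x == c)).length : Int) + 1) - v)
         | none => (a,
             d.insert c (d.getD c 0 + (((ls.takeWhile (fun x => x == c)).length : Int) + 1)),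
             seg + (((ls.takeWhile (fun x => x == c)).length : Int) + 1))) := by
  rw [solutionRunsB.eq_def]

-- main invariant: A's fold and B's run loop agree from matching states
lemma pvInv (N : Nat) : ∀ (l : List Char), l.length ≤ N → ∀ (tmp : List Char) (ans : Int),
    (l.foldl solutionStepA (ans, tmp ++ l, PySem.Dict.counter tmp, tmp)).1
      = (solutionRunsB l (ans, PySem.Dict.counter tmp, (tmp.length : Int))).1
    ∧ (l.foldl solutionStepA (ans, tmp ++ l, PySem.Dict.counter tmp, tmp)).2.1
      = (l.foldl solutionStepA (ans, tmp ++ l, PySem.Dict.counter tmp, tmp)).2.2.2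
    ∧ (solutionRunsB l (ans, PySem.Dict.counter tmp, (tmp.length : Int))).2.2
      = ((l.foldl solutionStepA (ans, tmp ++ l, PySem.Dict.counter tmp, tmp)).2.2.2.length : Int) := by
  induction N with
  | zero =>
    intro l hl tmp ans
    have : l = [] := List.eq_nil_of_length_eq_zero (by omega)
    subst this
    simp [solutionRunsB]
  | succ N ihN =>
    intro l hl tmp ans
    cases l with
    | nil => simp [solutionRunsB]
    | cons c ls =>
      have hsplit : ls.takeWhile (fun x => x == c) ++ ls.dropWhile (fun x => x == c) = ls :=
        List.takeWhile_append_dropWhile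
      have hRun : ∀ x ∈ c :: ls.takeWhile (fun x => x == c), x = c := by
        intro x hx
        rcases List.mem_cons.mp hx with h | h
        · exact h
        · exact beq_iff_eq.mp (List.mem_takeWhile_imp (p := fun x => x == c) (l := ls) h)
      have hrest_le : (ls.dropWhile (fun x => x == c)).length ≤ N := by
        have := List.length_dropWhile_le (fun x => x == c) ls
        simp only [List.length_cons] at hl
        omega
      have hA : (c :: ls) = (c :: ls.takeWhile (fun x => x == c)) ++ ls.dropWhile (fun x => x == c) := by
        rw [List.cons_append, hsplit]
      rw [pvRunsB_cons, hA, List.foldl_append, pvChunk (c :: ls.takeWhile (fun x => x == c)) c hRun]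
      simp only [PySem.Dict.getD_counter]
      have hR' : ∀ x ∈ ls.takeWhile (fun x => x == c), x = c :=
        fun x hx => hRun x (List.mem_cons_of_mem c hx)
      have hlen : (((c :: ls.takeWhile (fun x => x == c)).length : Nat) : Int)
          = (((ls.takeWhile (fun x => x == c)).length : Nat) : Int) + 1 := by
        simp only [List.length_cons]
        push_cast
        ring
      rw [hlen]
      have hcandEq : List.map (fun p => p.2)
            (List.filter (fun p => p.1 != c &&
              decide ((List.count c tmp : Int) < p.2 ∧
                p.2 ≤ (List.count c tmp : Int) + (((ls.takeWhile (fun x => x == c)).length : Int) + 1)))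
              (PySem.Dict.counter tmp).items)
          = pvCand tmp c (((ls.takeWhile (fun x => x == c)).length : Int) + 1) := rfl
      rw [hcandEq]
      cases hE : PySem.List.min?
          (pvCand tmp c (((ls.takeWhile (fun x => x == c)).length : Int) + 1)) id with
      | none =>
        have hins : (PySem.Dict.counter tmp).insert c
              ((List.count c tmp : Int) + (((ls.takeWhile (fun x => x == c)).length : Int) + 1))
            = PySem.Dict.counter (tmp ++ (c :: ls.takeWhile (fun x => x == c))) := by
          have ht : ((List.count c tmp : Int) + (((ls.takeWhile (fun x => x == c)).length : Int) + 1))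
              = (List.count c tmp : Int) + (((ls.takeWhile (fun x => x == c)).length + 1 : Nat) : Int) := by
            push_cast
            ring
          rw [ht, pvCounterAppendRun tmp c _ (by omega)]
          congr 1
          rw [List.replicate_succ]
          congr 1
          conv_rhs => rw [List.eq_replicate_of_mem hR']
        have hseg : ((tmp.length : Int) + (((ls.takeWhile (fun x => x == c)).length : Int) + 1))
            = (((tmp ++ (c :: ls.takeWhile (fun x => x == c))).length : Nat) : Int) := by
          simp only [List.length_append, List.length_cons]
          push_cast
          ring
        rw [hins, hseg]
        exact ihN _ hrest_le (tmp ++ (c :: ls.takeWhile (fun x => x == c))) ans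
      | some v =>
        dsimp only []
        have hv := (pvCand_mem tmp c _ v).mp (PySem.List.min?_mem hE)
        obtain ⟨k, _, _, _, _, hvhi⟩ := hv
        have hnn : 0 ≤ (List.count c tmp : Int)
            + (((ls.takeWhile (fun x => x == c)).length : Int) + 1) - v := by omega
        have hdict : (if ((List.count c tmp : Int)
                + (((ls.takeWhile (fun x => x == c)).length : Int) + 1) - v) ≠ 0
              then PySem.Dict.empty.insert c ((List.count c tmp : Int)
                + (((ls.takeWhile (fun x => x == c)).length : Int) + 1) - v)
              else PySem.Dict.empty)
            = PySem.Dict.counter (List.replicate ((List.count c tmp : Int)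
                + (((ls.takeWhile (fun x => x == c)).length : Int) + 1) - v).toNat c) := by
          rw [pvCounterReplicate]
          by_cases hz : ((List.count c tmp : Int)
              + (((ls.takeWhile (fun x => x == c)).length : Int) + 1) - v) = 0
          · rw [if_neg (by omega), if_pos (by omega)]
          · rw [if_pos hz, if_neg (by omega)]
            congr 1
            omega
        have hseg : ((List.count c tmp : Int)
              + (((ls.takeWhile (fun x => x == c)).length : Int) + 1) - v)
            = (((List.replicate ((List.count c tmp : Int)
                + (((ls.takeWhile (fun x => x == c)).length : Int) + 1) - v).toNat c).length : Nat) : Int) := by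
          simp only [List.length_replicate]
          omega
        have hstate : ((ans : Int) + 1,
            (if ((List.count c tmp : Int) + (((ls.takeWhile (fun x => x == c)).length : Int) + 1) - v) ≠ 0
             then PySem.Dict.empty.insert c ((List.count c tmp : Int) + (((ls.takeWhile (fun x => x == c)).length : Int) + 1) - v)
             else PySem.Dict.empty), ((List.count c tmp : Int) + (((ls.takeWhile (fun x => x == c)).length : Int) + 1) - v))
          = ((ans : Int) + 1,
             PySem.Dict.counter (List.replicate ((List.count c tmp : Int) + (((ls.takeWhile (fun x => x == c)).length : Int) + 1) - v).toNat c),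
             (((List.replicate ((List.count c tmp : Int) + (((ls.takeWhile (fun x => x == c)).length : Int) + 1) - v).toNat c).length : Nat) : Int)) := by
          rw [hdict]
          exact congrArg (fun z => ((ans : Int) + 1,
            PySem.Dict.counter (List.replicate ((List.count c tmp : Int) + (((ls.takeWhile (fun x => x == c)).length : Int) + 1) - v).toNat c), z)) hseg
        rw [hstate]
        exact ihN _ hrest_le (List.replicate ((List.count c tmp : Int) + (((ls.takeWhile (fun x => x == c)).length : Int) + 1) - v).toNat c) (ans + 1)

-- ===== VERDICT (by name: the statement is the Claim_ definition above) =====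
theorem solution_spec : Claim_equal_solution := by
  intro s _
  unfold Spec_solution solution solution_alt
  have h := pvInv s.toList.length s.toList le_rfl [] 0
  simp only [List.nil_append, List.length_nil, Nat.cast_zero] at h
  have h0 : PySem.Dict.counter ([] : List Char) = PySem.Dict.empty := rfl
  rw [h0] at h
  obtain ⟨h1, h2, h3⟩ := h
  simp only []
  rw [h2, h1, h3]
  split_ifs with hp hq hq <;> omega
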